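-- pv_equiv track=rewrite | github.com/whittin3/ministack | ministack/services/rds.py | _apply_instance_filters
-- ===== SOURCE A (Python) =====
-- def _apply_instance_filters(instances, filters):
--     result = []
--     for inst in instances:
--         match = True
--         for fname, fvals in filters.items():
--             if fname == "db-instance-id":
--                 if inst["DBInstanceIdentifier"] not in fvals:
--                     match = False
--             elif fname == "engine":
--                 if inst["Engine"] not in fvals:
--                     match = False
--             elif fname == "db-cluster-id":
--                 if inst.get("DBClusterIdentifier", "") not in fvals:
--                     match = False
--         if match:
--             result.append(inst)
--     return result
-- ===== SOURCE B (Python) =====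
-- def _apply_instance_filters(instances, filters):
--     result = list(instances)
--     for fname, fvals in filters.items():
--         if fname == "db-instance-id":
--             result = [inst for inst in result if inst["DBInstanceIdentifier"] in fvals]
--         elif fname == "engine":
--             result = [inst for inst in result if inst["Engine"] in fvals]
--         elif fname == "db-cluster-id":
--             result = [inst for inst in result if inst.get("DBClusterIdentifier", "") in fvals]
--     return result
-- ===== Notes on version B (the rewrite author's own statement) =====
-- stated objective: faster
-- what changed: B replaces A's per-instance loop that tests every filter with a successive-filtering pipeline: one list-comprehension pass over the (shrinking) instance list per filter entry, skipping unknown filter names.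
import Mathlib
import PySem

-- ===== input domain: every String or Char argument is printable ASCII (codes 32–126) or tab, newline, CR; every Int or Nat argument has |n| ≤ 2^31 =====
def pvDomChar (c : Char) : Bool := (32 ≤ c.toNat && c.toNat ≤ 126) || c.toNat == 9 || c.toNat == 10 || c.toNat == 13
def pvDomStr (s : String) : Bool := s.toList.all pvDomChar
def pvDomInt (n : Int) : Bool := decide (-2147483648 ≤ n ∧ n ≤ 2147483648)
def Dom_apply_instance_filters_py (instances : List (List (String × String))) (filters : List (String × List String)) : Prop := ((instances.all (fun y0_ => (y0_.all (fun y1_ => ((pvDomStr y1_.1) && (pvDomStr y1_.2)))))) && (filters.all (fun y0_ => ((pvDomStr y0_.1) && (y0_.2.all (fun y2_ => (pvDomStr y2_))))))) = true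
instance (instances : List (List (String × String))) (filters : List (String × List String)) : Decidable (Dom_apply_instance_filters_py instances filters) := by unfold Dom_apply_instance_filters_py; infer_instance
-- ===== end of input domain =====

-- B rewrites A's one scan testing all filters per instance as a successive-filtering pipeline (one pass per filter entry); equal return value on Pre_ (where A does not raise).

-- ===== PORT A =====
-- first-match lookup in an insertion-ordered dict (Python d[k] / d.get(k, dflt))
def pvLookup (d : List (String × String)) (k : String) : Option String :=
  match d with
  | [] => none
  | (a, b) :: rest => if a = k then some b else pvLookup rest k

-- inner 'for fname, fvals in filters.items()' loop of A; none = KeyError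
def pvA_inner (inst : List (String × String)) (fs : List (String × List String)) (m : Bool) : Option Bool :=
  match fs with
  | [] => some m
  | (fname, fvals) :: rest =>
    if fname = "db-instance-id" then
      match pvLookup inst "DBInstanceIdentifier" with
      | none => none
      | some v => pvA_inner inst rest (if fvals.contains v then m else false)
    else if fname = "engine" then
      match pvLookup inst "Engine" with
      | none => none
      | some v => pvA_inner inst rest (if fvals.contains v then m else false)
    else if fname = "db-cluster-id" then
      pvA_inner inst rest (if fvals.contains ((pvLookup inst "DBClusterIdentifier").getD "") then m else false)
    else pvA_inner inst rest m

-- outer 'for inst in instances' loop of A, appending matching instances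
def pvA_outer (filters : List (String × List String)) (instances : List (List (String × String))) (res : List (List (String × String))) : Option (List (List (String × String))) :=
  match instances with
  | [] => some res
  | inst :: rest =>
    match pvA_inner inst filters true with
    | none => none
    | some m => pvA_outer filters rest (if m then res ++ [inst] else res)

def apply_instance_filters_py (instances : List (List (String × String))) (filters : List (String × List String)) : List (List (String × String)) :=
  (pvA_outer filters instances []).getD []

-- ===== PORT B =====
-- one filtering pass keeping instances whose key's value (KeyError = none) is in fvals
def pvB_filterKey (key : String) (fvals : List String) (l : List (List (String × String))) : Option (List (List (String × String))) :=
  match l with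
  | [] => some []
  | inst :: rest =>
    match pvLookup inst key with
    | none => none
    | some v =>
      match pvB_filterKey key fvals rest with
      | none => none
      | some r => some (if fvals.contains v then inst :: r else r)

-- one iteration of B's 'for fname, fvals in filters.items()' pipeline
def pvB_pass (res : List (List (String × String))) (fname : String) (fvals : List String) : Option (List (List (String × String))) :=
  if fname = "db-instance-id" then pvB_filterKey "DBInstanceIdentifier" fvals res
  else if fname = "engine" then pvB_filterKey "Engine" fvals res
  else if fname = "db-cluster-id" then
    some (res.filter (fun inst => fvals.contains ((pvLookup inst "DBClusterIdentifier").getD "")))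
  else some res

def apply_instance_filters_py_alt (instances : List (List (String × String))) (filters : List (String × List String)) : List (List (String × String)) :=
  (filters.foldl (fun acc p => acc.bind (fun res => pvB_pass res p.1 p.2)) (some instances)).getD []

-- ===== PRECONDITION & SPEC =====
-- Pre_ excludes exactly the inputs where A raises KeyError: a "db-instance-id" ("engine") filter present while some instance lacks the "DBInstanceIdentifier" ("Engine") key.
def Pre_apply_instance_filters_py (instances : List (List (String × String))) (filters : List (String × List String)) : Prop :=
  ∀ p ∈ filters, ∀ inst ∈ instances,
    (p.1 = "db-instance-id" → "DBInstanceIdentifier" ∈ inst.map Prod.fst) ∧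
    (p.1 = "engine" → "Engine" ∈ inst.map Prod.fst)
instance (instances : List (List (String × String))) (filters : List (String × List String)) : Decidable (Pre_apply_instance_filters_py instances filters) := by unfold Pre_apply_instance_filters_py; infer_instance

def pvWitness_apply_instance_filters_py : (List (List (String × String))) × (List (String × List String)) :=
  ([[("DBInstanceIdentifier", "db1"), ("Engine", "mysql")], [("DBInstanceIdentifier", "db2"), ("Engine", "postgres")]],
   [("engine", ["mysql"]), ("other", ["x"])])

def Spec_apply_instance_filters_py (instances : List (List (String × String))) (filters : List (String × List String)) (out : List (List (String × String))) : Prop := out = apply_instance_filters_py_alt instances filters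
instance (instances : List (List (String × String))) (filters : List (String × List String)) (out : List (List (String × String))) : Decidable (Spec_apply_instance_filters_py instances filters out) := by unfold Spec_apply_instance_filters_py; infer_instance

-- ===== CLAIM (what is proved, stated in full; the proofs are below) =====
def Claim_equal_apply_instance_filters_py : Prop := ∀ (instances : List (List (String × String))) (filters : List (String × List String)), Dom_apply_instance_filters_py instances filters → Pre_apply_instance_filters_py instances filters → Spec_apply_instance_filters_py instances filters (apply_instance_filters_py instances filters)

-- ===== LEMMAS AND PROOFS =====

-- the per-entry condition both programs test (under Pre_, keys are present for id/engine)
def pvCond (inst : List (String × String)) (fname : String) (fvals : List String) : Bool :=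
  if fname = "db-instance-id" then fvals.contains ((pvLookup inst "DBInstanceIdentifier").getD "")
  else if fname = "engine" then fvals.contains ((pvLookup inst "Engine").getD "")
  else if fname = "db-cluster-id" then fvals.contains ((pvLookup inst "DBClusterIdentifier").getD "")
  else true

theorem pvLookup_isSome_iff (d : List (String × String)) (k : String) :
    (pvLookup d k).isSome ↔ k ∈ d.map Prod.fst := by
  induction d with
  | nil => simp [pvLookup]
  | cons p rest ih =>
    obtain ⟨a, b⟩ := p
    by_cases h : a = k
    · simp [pvLookup, h]
    · simp only [pvLookup, if_neg h, List.map_cons, List.mem_cons, ih]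
      exact ⟨Or.inr, fun o => o.elim (fun e => absurd e.symm h) id⟩

theorem pvA_inner_eq (inst : List (String × String)) (fs : List (String × List String)) (m : Bool)
    (h : ∀ p ∈ fs, (p.1 = "db-instance-id" → (pvLookup inst "DBInstanceIdentifier").isSome) ∧
                   (p.1 = "engine" → (pvLookup inst "Engine").isSome)) :
    pvA_inner inst fs m = some (m && fs.all (fun p => pvCond inst p.1 p.2)) := by
  induction fs generalizing m with
  | nil => simp [pvA_inner]
  | cons p rest ih =>
    obtain ⟨fname, fvals⟩ := p
    have hp := h (fname, fvals) (List.mem_cons_self ..)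
    have hrest : ∀ p ∈ rest, (p.1 = "db-instance-id" → (pvLookup inst "DBInstanceIdentifier").isSome) ∧
                   (p.1 = "engine" → (pvLookup inst "Engine").isSome) :=
      fun q hq => h q (List.mem_cons_of_mem _ hq)
    by_cases h1 : fname = "db-instance-id"
    · obtain ⟨v, hv⟩ := Option.isSome_iff_exists.mp (hp.1 h1)
      simp [pvA_inner, h1, hv, ih _ hrest, pvCond]
      by_cases hc : v ∈ fvals <;> simp [hc]
    · by_cases h2 : fname = "engine"
      · obtain ⟨v, hv⟩ := Option.isSome_iff_exists.mp (hp.2 h2)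
        simp [pvA_inner, h1, h2, hv, ih _ hrest, pvCond]
        by_cases hc : v ∈ fvals <;> simp [hc]
      · by_cases h3 : fname = "db-cluster-id"
        · simp [pvA_inner, h1, h2, h3, ih _ hrest, pvCond]
          by_cases hc : (pvLookup inst "DBClusterIdentifier").getD "" ∈ fvals <;> simp [hc]
        · simp [pvA_inner, h1, h2, h3, ih _ hrest, pvCond]

theorem pvA_outer_eq (filters : List (String × List String)) (instances : List (List (String × String)))
    (res : List (List (String × String)))
    (h : ∀ p ∈ filters, ∀ inst ∈ instances,
      (p.1 = "db-instance-id" → (pvLookup inst "DBInstanceIdentifier").isSome) ∧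
      (p.1 = "engine" → (pvLookup inst "Engine").isSome)) :
    pvA_outer filters instances res =
      some (res ++ instances.filter (fun inst => filters.all (fun p => pvCond inst p.1 p.2))) := by
  induction instances generalizing res with
  | nil => simp [pvA_outer]
  | cons inst rest ih =>
    have hinst : ∀ p ∈ filters, (p.1 = "db-instance-id" → (pvLookup inst "DBInstanceIdentifier").isSome) ∧
                   (p.1 = "engine" → (pvLookup inst "Engine").isSome) :=
      fun q hq => h q hq inst (List.mem_cons_self ..)
    have hrest : ∀ p ∈ filters, ∀ i ∈ rest,
        (p.1 = "db-instance-id" → (pvLookup i "DBInstanceIdentifier").isSome) ∧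
        (p.1 = "engine" → (pvLookup i "Engine").isSome) :=
      fun q hq i hi => h q hq i (List.mem_cons_of_mem _ hi)
    simp only [pvA_outer, pvA_inner_eq inst filters true hinst, Bool.true_and]
    cases hm : filters.all (fun p => pvCond inst p.1 p.2) <;>
      simp [ih _ hrest, List.filter_cons, hm]

theorem pvB_filterKey_eq (key : String) (fvals : List String) (l : List (List (String × String)))
    (h : ∀ inst ∈ l, (pvLookup inst key).isSome) :
    pvB_filterKey key fvals l = some (l.filter (fun inst => fvals.contains ((pvLookup inst key).getD ""))) := by
  induction l with
  | nil => simp [pvB_filterKey]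
  | cons inst rest ih =>
    obtain ⟨v, hv⟩ := Option.isSome_iff_exists.mp (h inst (List.mem_cons_self ..))
    have hrest := fun i hi => h i (List.mem_cons_of_mem _ hi)
    simp only [pvB_filterKey, hv, ih hrest, List.filter_cons]
    by_cases hc : v ∈ fvals <;> simp [hv, hc]

theorem pvB_pass_eq (res : List (List (String × String))) (fname : String) (fvals : List String)
    (h : ∀ inst ∈ res, (fname = "db-instance-id" → (pvLookup inst "DBInstanceIdentifier").isSome) ∧
                       (fname = "engine" → (pvLookup inst "Engine").isSome)) :
    pvB_pass res fname fvals = some (res.filter (fun inst => pvCond inst fname fvals)) := by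
  by_cases h1 : fname = "db-instance-id"
  · rw [pvB_pass, if_pos h1, pvB_filterKey_eq _ _ _ (fun i hi => (h i hi).1 h1)]
    simp [pvCond, h1]
  · by_cases h2 : fname = "engine"
    · rw [pvB_pass, if_neg h1, if_pos h2, pvB_filterKey_eq _ _ _ (fun i hi => (h i hi).2 h2)]
      simp [pvCond, h1, h2]
    · by_cases h3 : fname = "db-cluster-id" <;> simp [pvB_pass, pvCond, h1, h2, h3]

theorem pvB_fold_eq (filters : List (String × List String)) (l : List (List (String × String)))
    (h : ∀ p ∈ filters, ∀ inst ∈ l,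
      (p.1 = "db-instance-id" → (pvLookup inst "DBInstanceIdentifier").isSome) ∧
      (p.1 = "engine" → (pvLookup inst "Engine").isSome)) :
    filters.foldl (fun acc p => acc.bind (fun res => pvB_pass res p.1 p.2)) (some l) =
      some (l.filter (fun inst => filters.all (fun p => pvCond inst p.1 p.2))) := by
  induction filters generalizing l with
  | nil => simp
  | cons p rest ih =>
    have hp : ∀ inst ∈ l, (p.1 = "db-instance-id" → (pvLookup inst "DBInstanceIdentifier").isSome) ∧
                          (p.1 = "engine" → (pvLookup inst "Engine").isSome) :=
      fun i hi => h p (List.mem_cons_self ..) i hi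
    have hsub : ∀ q ∈ rest, ∀ inst ∈ l.filter (fun inst => pvCond inst p.1 p.2),
        (q.1 = "db-instance-id" → (pvLookup inst "DBInstanceIdentifier").isSome) ∧
        (q.1 = "engine" → (pvLookup inst "Engine").isSome) :=
      fun q hq i hi => h q (List.mem_cons_of_mem _ hq) i (List.mem_of_mem_filter hi)
    simp only [List.foldl_cons, Option.bind_some, pvB_pass_eq _ _ _ hp, ih _ hsub,
      List.filter_filter]
    congr 1
    apply List.filter_congr
    intro i _
    simp [Bool.and_comm]

-- ===== VERDICT (by name: the statement is the Claim_ definition above) =====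
theorem apply_instance_filters_py_spec : Claim_equal_apply_instance_filters_py := by
  intro instances filters _ hpre
  have hpre' : ∀ p ∈ filters, ∀ inst ∈ instances,
      (p.1 = "db-instance-id" → (pvLookup inst "DBInstanceIdentifier").isSome) ∧
      (p.1 = "engine" → (pvLookup inst "Engine").isSome) := by
    intro p hp inst hi
    have := hpre p hp inst hi
    exact ⟨fun h => (pvLookup_isSome_iff _ _).mpr (this.1 h),
           fun h => (pvLookup_isSome_iff _ _).mpr (this.2 h)⟩
  unfold Spec_apply_instance_filters_py apply_instance_filters_py apply_instance_filters_py_alt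
  rw [pvA_outer_eq filters instances [] hpre', pvB_fold_eq filters instances hpre']
  simp
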